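-- pv_equiv track=rewrite | github.com/million-t/Codeforces-Solutions | D_Beautiful_Graph.py | dfs
-- ===== SOURCE A (Python) =====
-- MOD = 998244353
--
-- def dfs(graph, n):
--
--     color = [-1]*(n)
--
--     ans = 1
--     for node in range(n):
--
--         if color[node] != -1:
--             continue
--
--
--         sub_ans = [0, 1]
--         color[node] = 1
--
--         stack = [node]
--         while stack:
--             cur = stack.pop()
--
--             for neigh in graph[cur]:
--                 if color[neigh] != -1:
--                     if color[neigh] == color[cur]:
--                         return 0
--
--                     continue
--
--                 color[neigh] = 1 - color[cur]
--                 sub_ans[color[neigh]] += 1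
--
--                 stack.append(neigh)
--
--         ans = (ans*((pow(2, sub_ans[0], MOD) + pow(2, sub_ans[1], MOD))))%MOD
--
--     return ans
-- ===== SOURCE B (Python) =====
-- MOD = 998244353
--
-- def dfs(graph, n):
--     # phase 1: greedily 2-color every node, component by component (no conflict logic here)
--     color = [-1] * n
--     comp = [-1] * n
--     roots = []
--     for node in range(n):
--         if color[node] != -1:
--             continue
--         roots.append(node)
--         color[node] = 1
--         comp[node] = node
--         stack = [node]
--         while stack:
--             cur = stack.pop()
--             for v in graph[cur]:
--                 if color[v] == -1:
--                     color[v] = 1 - color[cur]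
--                     comp[v] = node
--                     stack.append(v)
--     # phase 2: validate every edge against the finished coloring
--     for u in range(n):
--         for v in graph[u]:
--             if color[v] == color[u]:
--                 return 0
--     # phase 3: group color counts per component and multiply
--     counts = {}
--     for v in range(n):
--         c = counts.setdefault(comp[v], [0, 0])
--         c[color[v]] += 1
--     ans = 1
--     for r in roots:
--         a, b = counts[r]
--         ans = ans * (pow(2, a, MOD) + pow(2, b, MOD)) % MOD
--     return ans
-- ===== Notes on version B (the rewrite author's own statement) =====
-- stated objective: alternative
-- what changed: Replaces A's single interleaved pass (a DFS that checks bipartiteness conflicts and multiplies the per-component answer on the fly, returning 0 mid-traversal) by a three-phase pipeline: first greedily 2-color all nodes component by component with no conflict logic, then validate every edge against the finished coloring in one scan, then group per-component color counts with a dictionary and fold the product; equivalent because colors are write-once, so A's scan-time comparisons equal comparisons against the final coloring.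
-- outside the precondition, e.g. on dfs([[-1], [], [1]], 2): A returns 0, B returns 4
import Mathlib
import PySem

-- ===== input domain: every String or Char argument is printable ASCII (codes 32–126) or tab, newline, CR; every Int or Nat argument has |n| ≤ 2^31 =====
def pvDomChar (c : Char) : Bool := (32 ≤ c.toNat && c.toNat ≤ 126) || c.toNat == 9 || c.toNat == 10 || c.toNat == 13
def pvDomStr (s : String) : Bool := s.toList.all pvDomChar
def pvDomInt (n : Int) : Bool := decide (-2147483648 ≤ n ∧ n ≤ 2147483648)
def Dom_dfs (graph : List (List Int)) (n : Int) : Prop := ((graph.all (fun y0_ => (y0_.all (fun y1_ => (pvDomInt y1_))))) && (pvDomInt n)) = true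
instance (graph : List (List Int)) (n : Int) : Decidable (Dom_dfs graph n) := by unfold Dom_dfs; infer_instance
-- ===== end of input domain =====

-- B replaces A's single interleaved DFS pass (conflict check + per-component product on the fly,
-- early return 0) by a pipeline: color all nodes, then validate every edge, then count per
-- component with a dict ('alternative': same asymptotic cost, different decomposition).

-- ===== PORT A =====
def pvMOD : Int := 998244353

-- Python's built-in pow(2, e, m), e ≥ 0 here (a builtin, ported as Mathlib pow + %)
def pvPow2 (e m : Int) : Int := ((2 : Int) ^ e.toNat) % m

-- inner `for neigh in graph[cur]` of A; `none` models `return 0`.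
-- The Lean stack keeps its top at the HEAD (Python appends/pops at the END): the same LIFO order.
-- color[cur] is passed in as cc: the loop writes only entries that equal -1, and color[cur] ≠ -1.
-- `sub_ans[color[neigh]] += 1` with color[neigh] = 1 - cc: first component for 0, second for 1.
def dfsNeigh (color : List Int) (cc : Int) (sub : Int × Int) (stack : List Int) :
    List Int → Option (List Int × (Int × Int) × List Int)
  | [] => some (color, sub, stack)
  | neigh :: rest =>
    let cn := PySem.List.pyGetD color neigh 0
    if cn ≠ -1 then
      if cn = cc then none
      else dfsNeigh color cc sub stack rest
    else
      dfsNeigh (PySem.List.pySetD color neigh (1 - cc)) cc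
        (if 1 - cc = 0 then (sub.1 + 1, sub.2) else (sub.1, sub.2 + 1))
        (neigh :: stack) rest

-- `while stack:` of A, with structural fuel; the caller passes 2*len(color)+1, which the
-- equivalence lemmas prove is never exhausted (each iteration pops one element and every push
-- turns a -1 entry into a color).  `none` models `return 0`.
def dfsWhile (graph : List (List Int)) : Nat → List Int → (Int × Int) → List Int →
    Option (List Int × (Int × Int))
  | 0, _, _, _ => none
  | _ + 1, color, sub, [] => some (color, sub)
  | f + 1, color, sub, cur :: rest =>
    match dfsNeigh color (PySem.List.pyGetD color cur 0) sub rest (PySem.List.pyGetD graph cur []) with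
    | none => none
    | some (c', s', st') => dfsWhile graph f c' s' st'

-- `for node in range(n):` of A
def dfsOuter (graph : List (List Int)) : List Int → List Int → Int → Int
  | [], _, ans => ans
  | node :: rest, color, ans =>
    if PySem.List.pyGetD color node 0 ≠ -1 then dfsOuter graph rest color ans
    else
      let color1 := PySem.List.pySetD color node 1
      match dfsWhile graph (2 * color1.length + 1) color1 (0, 1) [node] with
      | none => 0
      | some (c2, s) =>
          dfsOuter graph rest c2 (ans * (pvPow2 s.1 pvMOD + pvPow2 s.2 pvMOD) % pvMOD)

def dfs (graph : List (List Int)) (n : Int) : Int :=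
  dfsOuter graph (PySem.List.pyRange 0 n 1) (List.replicate n.toNat (-1)) 1

-- ===== PORT B =====
-- B phase 1 inner: `for v in graph[cur]:` — no conflict logic, also records comp
def dfsAltNeigh (color comp : List Int) (cc root : Int) (stack : List Int) :
    List Int → List Int × List Int × List Int
  | [] => (color, comp, stack)
  | v :: rest =>
    if PySem.List.pyGetD color v 0 = -1 then
      dfsAltNeigh (PySem.List.pySetD color v (1 - cc)) (PySem.List.pySetD comp v root)
        cc root (v :: stack) rest
    else dfsAltNeigh color comp cc root stack rest

-- B phase 1 `while stack:`; same fuel convention as dfsWhile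
def dfsAltWhile (graph : List (List Int)) (root : Int) : Nat → List Int → List Int →
    List Int → List Int × List Int
  | 0, color, comp, _ => (color, comp)
  | _ + 1, color, comp, [] => (color, comp)
  | f + 1, color, comp, cur :: rest =>
    match dfsAltNeigh color comp (PySem.List.pyGetD color cur 0) root rest
        (PySem.List.pyGetD graph cur []) with
    | (c', cp', st') => dfsAltWhile graph root f c' cp' st'

-- B phase 1 outer loop: produce color, comp and the roots list
def dfsAltColor (graph : List (List Int)) : List Int → List Int × List Int × List Int →
    List Int × List Int × List Int
  | [], st => st
  | node :: rest, (color, comp, roots) =>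
    if PySem.List.pyGetD color node 0 ≠ -1 then dfsAltColor graph rest (color, comp, roots)
    else
      let color1 := PySem.List.pySetD color node 1
      let comp1 := PySem.List.pySetD comp node node
      match dfsAltWhile graph node (2 * color1.length + 1) color1 comp1 [node] with
      | (c2, cp2) => dfsAltColor graph rest (c2, cp2, roots ++ [node])

-- B phase 2: `for u in range(n): for v in graph[u]: if color[v] == color[u]: return 0`
def dfsAltBad (graph : List (List Int)) (color : List Int) (n : Int) : Bool :=
  (PySem.List.pyRange 0 n 1).any (fun u =>
    (PySem.List.pyGetD graph u []).any (fun v =>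
      PySem.List.pyGetD color v 0 == PySem.List.pyGetD color u 0))

-- B phase 3a: `counts.setdefault(comp[v], [0,0])[color[v]] += 1` (color[v] ∈ {0,1} after phase 1)
def dfsAltCounts (color comp : List Int) (n : Int) : PySem.Dict Int (Int × Int) :=
  (PySem.List.pyRange 0 n 1).foldl (fun d v =>
    let key := PySem.List.pyGetD comp v 0
    let c := d.getD key (0, 0)
    if PySem.List.pyGetD color v 0 = 0 then d.insert key (c.1 + 1, c.2)
    else d.insert key (c.1, c.2 + 1)) PySem.Dict.empty

-- B phase 3b: `ans = ans * (pow(2,a,MOD) + pow(2,b,MOD)) % MOD` over roots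
-- (counts[r] is always present for r ∈ roots since comp[r] = r; getD's default is never used)
def dfsAltProd (counts : PySem.Dict Int (Int × Int)) (roots : List Int) : Int :=
  roots.foldl (fun ans r =>
    let c := counts.getD r (0, 0)
    ans * (pvPow2 c.1 pvMOD + pvPow2 c.2 pvMOD) % pvMOD) 1

def dfs_alt (graph : List (List Int)) (n : Int) : Int :=
  match dfsAltColor graph (PySem.List.pyRange 0 n 1)
      (List.replicate n.toNat (-1), List.replicate n.toNat (-1), []) with
  | (color, comp, roots) =>
    if dfsAltBad graph color n then 0
    else dfsAltProd (dfsAltCounts color comp n) roots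

-- ===== PRECONDITION & SPEC =====
-- Pre_ restricts the adjacency entries of the first n rows to [0, n), the natural domain of an
-- adjacency list on n nodes: entries ≥ n or < -n make A raise IndexError, and negative in-range
-- entries hit Python's negative-index wraparound (color[-k] and graph[-k] resolve against two
-- different list lengths), an accidental behaviour on a malformed adjacency list.  It also
-- requires n ≤ len(graph) (otherwise A raises IndexError at graph[cur]).
def Pre_dfs (graph : List (List Int)) (n : Int) : Prop :=
  n ≤ (graph.length : Int) ∧ ∀ row ∈ graph.take n.toNat, ∀ v ∈ row, 0 ≤ v ∧ v < n
instance (graph : List (List Int)) (n : Int) : Decidable (Pre_dfs graph n) := by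
  unfold Pre_dfs; infer_instance

def pvWitness_dfs : List (List Int) × Int := ([[1], [0], []], 3)

def Spec_dfs (graph : List (List Int)) (n : Int) (out : Int) : Prop := out = dfs_alt graph n
instance (graph : List (List Int)) (n : Int) (out : Int) : Decidable (Spec_dfs graph n out) := by
  unfold Spec_dfs; infer_instance

-- ===== CLAIM (what is proved, stated in full; the proofs are below) =====
def Claim_equal_dfs : Prop := ∀ (graph : List (List Int)) (n : Int),
  Dom_dfs graph n → Pre_dfs graph n → Spec_dfs graph n (dfs graph n)

-- ===== LEMMAS AND PROOFS =====

-- value of a list at a nonnegative Int index (0 outside)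
def vAt (c : List Int) (u : Int) : Int := c.getD u.toNat 0
-- adjacency row at a nonnegative Int index
def rowOf (g : List (List Int)) (u : Int) : List Int := g.getD u.toNat []
-- all adjacency entries of rows [0, n) lie in [0, n)
def GoodG (g : List (List Int)) (n : Int) : Prop :=
  ∀ u : Int, 0 ≤ u → u < n → ∀ v ∈ rowOf g u, 0 ≤ v ∧ v < n
-- the color array has length n and entries in {-1, 0, 1}
def ColOK (n : Int) (c : List Int) : Prop :=
  c.length = n.toNat ∧ ∀ u : Int, 0 ≤ u → u < n → vAt c u = -1 ∨ vAt c u = 0 ∨ vAt c u = 1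
-- comp is set exactly on colored entries, and its values are colored roots (comp[root] = root)
def CompOK (n : Int) (c comp : List Int) : Prop :=
  comp.length = n.toNat ∧ ∀ u : Int, 0 ≤ u → u < n →
    ((vAt c u = -1 ↔ vAt comp u = -1) ∧
     (vAt comp u ≠ -1 → 0 ≤ vAt comp u ∧ vAt comp u < n ∧
        vAt c (vAt comp u) ≠ -1 ∧ vAt comp (vAt comp u) = vAt comp u))
-- the stack holds distinct, in-range, colored nodes
def StackOK (n : Int) (c : List Int) (st : List Int) : Prop :=
  st.Nodup ∧ ∀ u ∈ st, 0 ≤ u ∧ u < n ∧ vAt c u ≠ -1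
-- every colored node not on the stack has all its neighbours colored with the opposite color
def Proper (g : List (List Int)) (n : Int) (c : List Int) (st : List Int) : Prop :=
  ∀ u : Int, 0 ≤ u → u < n → vAt c u ≠ -1 → u ∉ st →
    ∀ v ∈ rowOf g u, vAt c v ≠ -1 ∧ vAt c v ≠ vAt c u
-- number of indices with comp = r and color = v
def cnt (c comp : List Int) (r v : Int) : Int :=
  (((List.range c.length).countP
      (fun i : Nat => vAt comp (i : Int) == r && vAt c (i : Int) == v) : Nat) : Int)
-- number of uncolored entries
def pvUnc (c : List Int) : Nat := c.countP (fun x => x == -1)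
-- the product A accumulates, expressed over the current arrays
def ansOf (c comp : List Int) (roots : List Int) : Int :=
  roots.foldl (fun a r =>
    a * (pvPow2 (cnt c comp r 0) pvMOD + pvPow2 (cnt c comp r 1) pvMOD) % pvMOD) 1
-- B's phases 2 and 3 applied to a phase-1 state
def pvFinish (g : List (List Int)) (n : Int) (s : List Int × List Int × List Int) : Int :=
  match s with
  | (color, comp, roots) =>
    if dfsAltBad g color n then 0 else dfsAltProd (dfsAltCounts color comp n) roots

lemma pyGetD_vAt (c : List Int) (u : Int) (h : 0 ≤ u) : PySem.List.pyGetD c u 0 = vAt c u := by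
  have hu : u = ((u.toNat : Nat) : Int) := (Int.toNat_of_nonneg h).symm
  rw [hu, PySem.List.pyGetD_natCast, vAt]
  simp [List.getD]
  rw [max_eq_left h]

lemma pyGetD_rowOf (g : List (List Int)) (u : Int) (h : 0 ≤ u) :
    PySem.List.pyGetD g u [] = rowOf g u := by
  have hu : u = ((u.toNat : Nat) : Int) := (Int.toNat_of_nonneg h).symm
  rw [hu, PySem.List.pyGetD_natCast, rowOf]
  simp [List.getD]
  rw [max_eq_left h]

lemma pySetD_set (c : List Int) (u x : Int) (h : 0 ≤ u) :
    PySem.List.pySetD c u x = c.set u.toNat x := PySem.List.pySetD_of_nonneg c x h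

lemma vAt_set (c : List Int) (u w x : Int) (hu0 : 0 ≤ u) (hu : u.toNat < c.length)
    (hw0 : 0 ≤ w) : vAt (c.set u.toNat x) w = if w = u then x else vAt c w := by
  unfold vAt
  by_cases hwu : w = u
  · subst hwu
    simp [List.getD, hu]
  · have hne : u.toNat ≠ w.toNat := by omega
    simp [List.getD, List.getElem?_set_ne hne, hwu]

lemma unc_set (c : List Int) (u x : Int) (hu0 : 0 ≤ u) (hu : u.toNat < c.length)
    (hc : vAt c u = -1) (hx : x ≠ -1) : pvUnc (c.set u.toNat x) + 1 = pvUnc c := by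
  unfold pvUnc
  have hset : c.set u.toNat x = c.take u.toNat ++ x :: c.drop (u.toNat + 1) := by
    rw [List.set_eq_take_append_cons_drop]; simp [hu]
  have hcc : c = c.take u.toNat ++ vAt c u :: c.drop (u.toNat + 1) := by
    conv_lhs => rw [← List.take_append_drop u.toNat c]
    congr 1
    rw [← List.getElem_cons_drop hu]
    congr 1
    simp [vAt, List.getD, List.getElem?_eq_getElem hu]
  rw [hset]
  conv_rhs => rw [hcc]
  simp [List.countP_append, hc, hx]
  omega

lemma countP_range_set (N : Nat) (p q : Nat → Bool) (k : Nat) (hk : k < N)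
    (h : ∀ j, j ≠ k → q j = p j) :
    (((List.range N).countP q : Nat) : Int)
      = ((List.range N).countP p : Nat) + (if q k then 1 else 0) - (if p k then 1 else 0) := by
  induction N with
  | zero => omega
  | succ m ih =>
    rw [List.range_succ, List.countP_append, List.countP_append]
    by_cases hkm : k = m
    · subst hkm
      have hpq : (List.range k).countP q = (List.range k).countP p := by
        apply List.countP_congr
        intro j hj
        rw [h j (by simp at hj; omega)]
      simp only [List.countP_cons, List.countP_nil]
      rw [hpq]
      push_cast
      by_cases hq : q k <;> by_cases hp : p k <;> simp [hq, hp] <;> omega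
    · have hk' : k < m := by omega
      have := ih hk'
      have hqm : q m = p m := h m (by omega)
      simp only [List.countP_cons, List.countP_nil, hqm]
      push_cast at this ⊢
      by_cases hp : p m <;> simp [hp] <;> omega

lemma cnt_set (c comp : List Int) (hlen : comp.length = c.length) (u x root r v : Int)
    (hu0 : 0 ≤ u) (hu : u.toNat < c.length) (hold : ¬ (vAt comp u = r ∧ vAt c u = v)) :
    cnt (c.set u.toNat x) (comp.set u.toNat root) r v
      = cnt c comp r v + (if root = r ∧ x = v then 1 else 0) := by
  unfold cnt
  have hlen2 : (c.set u.toNat x).length = c.length := by simp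
  rw [hlen2]
  have hagree : ∀ j, j ≠ u.toNat →
      (vAt (comp.set u.toNat root) (j : Int) == r && vAt (c.set u.toNat x) (j : Int) == v)
        = (vAt comp (j : Int) == r && vAt c (j : Int) == v) := by
    intro j hj
    have h1 : vAt (comp.set u.toNat root) (j : Int) = vAt comp (j : Int) := by
      rw [vAt_set comp u (j : Int) root hu0 (by omega) (by positivity)]
      have : ((j : Int) = u) = False := by
        simp only [eq_iff_iff, iff_false]
        intro hh; apply hj; omega
      simp [this]
    have h2 : vAt (c.set u.toNat x) (j : Int) = vAt c (j : Int) := by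
      rw [vAt_set c u (j : Int) x hu0 hu (by positivity)]
      have : ((j : Int) = u) = False := by
        simp only [eq_iff_iff, iff_false]
        intro hh; apply hj; omega
      simp [this]
    simp only [h1, h2]
  rw [countP_range_set c.length _ _ u.toNat hu hagree]
  have hq : vAt (comp.set u.toNat root) ((u.toNat : Nat) : Int) = root := by
    rw [vAt_set comp u _ root hu0 (by omega) (by positivity)]
    simp [Int.toNat_of_nonneg hu0]
  have hq2 : vAt (c.set u.toNat x) ((u.toNat : Nat) : Int) = x := by
    rw [vAt_set c u _ x hu0 hu (by positivity)]
    simp [Int.toNat_of_nonneg hu0]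
  have hp : vAt comp ((u.toNat : Nat) : Int) = vAt comp u := by
    rw [Int.toNat_of_nonneg hu0]
  have hp2 : vAt c ((u.toNat : Nat) : Int) = vAt c u := by
    rw [Int.toNat_of_nonneg hu0]
  simp only [hq, hq2, hp, hp2]
  by_cases h1 : root = r <;> by_cases h2 : x = v <;>
    simp [h1, h2, hold] <;> omega

-- A's inner loop returns `none` only at an already-colored neighbour carrying cc itself
lemma neigh_conflict (ns : List Int) : ∀ (c : List Int) (cc : Int) (sub : Int × Int)
    (st : List Int), (cc = 0 ∨ cc = 1) → (∀ v ∈ ns, 0 ≤ v) →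
    dfsNeigh c cc sub st ns = none → ∃ v ∈ ns, 0 ≤ v ∧ vAt c v = cc := by
  induction ns with
  | nil => intro c cc sub st _ _ h; simp [dfsNeigh] at h
  | cons v rest ih =>
    intro c cc sub st hcc hnn h
    have hv0 : 0 ≤ v := hnn v (by simp)
    simp only [dfsNeigh] at h
    rw [pyGetD_vAt c v hv0] at h
    by_cases h1 : vAt c v = -1
    · rw [if_neg (not_not_intro h1)] at h
      rw [pySetD_set c v (1 - cc) hv0] at h
      obtain ⟨w, hw, hw0, hwc⟩ :=
        ih _ cc _ _ hcc (fun x hx => hnn x (by simp [hx])) h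
      refine ⟨w, by simp [hw], hw0, ?_⟩
      by_cases hin : v.toNat < c.length
      · rw [vAt_set c v w (1 - cc) hv0 hin hw0] at hwc
        rcases hcc with h' | h' <;>
          · by_cases hwv : w = v
            · exfalso; rw [hwv, if_pos rfl] at hwc; omega
            · simpa [hwv] using hwc
      · rwa [List.set_eq_of_length_le (by omega)] at hwc
    · rw [if_pos h1] at h
      by_cases h2 : vAt c v = cc
      · exact ⟨v, by simp, hv0, h2⟩
      · rw [if_neg h2] at h
        obtain ⟨w, hw, hw0, hwc⟩ :=
          ih c cc sub st hcc (fun x hx => hnn x (by simp [hx])) h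
        exact ⟨w, by simp [hw], hw0, hwc⟩

-- B's inner loop only recolors -1 entries and only pushes stack or row members
lemma altNeigh_mono (ns : List Int) : ∀ (c comp : List Int) (cc root : Int) (st : List Int),
    (∀ v ∈ ns, 0 ≤ v) →
    (dfsAltNeigh c comp cc root st ns).1.length = c.length ∧
    (∀ u : Int, 0 ≤ u → vAt c u ≠ -1 → vAt (dfsAltNeigh c comp cc root st ns).1 u = vAt c u) ∧
    (∀ p ∈ (dfsAltNeigh c comp cc root st ns).2.2, p ∈ st ∨ p ∈ ns) := by
  induction ns with
  | nil => intro c comp cc root st _; simp [dfsAltNeigh]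
  | cons v rest ih =>
    intro c comp cc root st hnn
    have hv0 : 0 ≤ v := hnn v (by simp)
    simp only [dfsAltNeigh]
    rw [pyGetD_vAt c v hv0]
    by_cases h1 : vAt c v = -1
    · rw [if_pos h1]
      rw [pySetD_set c v (1 - cc) hv0, pySetD_set comp v root hv0]
      obtain ⟨hlen, hmono, hst⟩ := ih (c.set v.toNat (1 - cc)) (comp.set v.toNat root)
        cc root (v :: st) (fun x hx => hnn x (by simp [hx]))
      refine ⟨by simpa using hlen, ?_, ?_⟩
      · intro u hu0 hcu
        have hne : vAt (c.set v.toNat (1 - cc)) u = vAt c u := by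
          by_cases hin : v.toNat < c.length
          · rw [vAt_set c v u (1 - cc) hv0 hin hu0]
            by_cases huv : u = v
            · rw [huv] at hcu; exact absurd h1 hcu
            · simp [huv]
          · rw [List.set_eq_of_length_le (by omega)]
        rw [hmono u hu0 (by rw [hne]; exact hcu), hne]
      · intro p hp
        rcases hst p hp with h | h
        · rcases List.mem_cons.mp h with h | h
          · right; simp [h]
          · left; exact h
        · right; simp [h]
    · rw [if_neg h1]
      obtain ⟨hlen, hmono, hst⟩ := ih c comp cc root st (fun x hx => hnn x (by simp [hx]))
      exact ⟨hlen, hmono, fun p hp => by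
        rcases hst p hp with h | h
        · left; exact h
        · right; simp [h]⟩

-- B's while loop only recolors -1 entries
lemma altWhile_mono (g : List (List Int)) (n root : Int) (hg : GoodG g n) :
    ∀ (fuel : Nat) (c comp st : List Int), (∀ p ∈ st, 0 ≤ p ∧ p < n) →
    (dfsAltWhile g root fuel c comp st).1.length = c.length ∧
    ∀ u : Int, 0 ≤ u → vAt c u ≠ -1 →
      vAt (dfsAltWhile g root fuel c comp st).1 u = vAt c u := by
  intro fuel
  induction fuel with
  | zero => intro c comp st _; exact ⟨rfl, fun u _ _ => rfl⟩
  | succ f ih =>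
    intro c comp st hst
    cases st with
    | nil => exact ⟨rfl, fun u _ _ => rfl⟩
    | cons cur rest =>
      have hcur := hst cur (by simp)
      simp only [dfsAltWhile]
      rw [pyGetD_rowOf g cur hcur.1]
      rcases hR : dfsAltNeigh c comp (PySem.List.pyGetD c cur 0) root rest (rowOf g cur)
        with ⟨c', cp', st'⟩
      have hrow : ∀ v ∈ rowOf g cur, 0 ≤ v := fun v hv => (hg cur hcur.1 hcur.2 v hv).1
      obtain ⟨hlen, hmono, hstk⟩ := altNeigh_mono (rowOf g cur) c comp
        (PySem.List.pyGetD c cur 0) root rest hrow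
      rw [hR] at hlen hmono hstk
      have hst' : ∀ p ∈ st', 0 ≤ p ∧ p < n := by
        intro p hp
        rcases hstk p hp with h | h
        · exact ⟨(hst p (by simp [h])).1, (hst p (by simp [h])).2⟩
        · exact ⟨(hg cur hcur.1 hcur.2 p h).1, (hg cur hcur.1 hcur.2 p h).2⟩
      obtain ⟨ihlen, ihmono⟩ := ih c' cp' st' hst'
      refine ⟨by rw [ihlen, hlen], ?_⟩
      intro u hu0 hcu
      rw [ihmono u hu0 (by rw [hmono u hu0 hcu]; exact hcu), hmono u hu0 hcu]

-- B's phase-1 outer loop only recolors -1 entries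
lemma altColor_mono (g : List (List Int)) (n : Int) (hg : GoodG g n) :
    ∀ (ns : List Int) (s : List Int × List Int × List Int), (∀ x ∈ ns, 0 ≤ x ∧ x < n) →
    (dfsAltColor g ns s).1.length = s.1.length ∧
    ∀ u : Int, 0 ≤ u → vAt s.1 u ≠ -1 → vAt (dfsAltColor g ns s).1 u = vAt s.1 u := by
  intro ns
  induction ns with
  | nil => exact fun _ _ => ⟨rfl, fun u _ _ => rfl⟩
  | cons node rest ih =>
    intro s hbs
    obtain ⟨c, comp, roots⟩ := s
    have hnode := hbs node (by simp)
    simp only [dfsAltColor]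
    rw [pyGetD_vAt c node hnode.1]
    by_cases h1 : vAt c node = -1
    · rw [if_neg (not_not_intro h1)]
      rw [pySetD_set c node 1 hnode.1, pySetD_set comp node node hnode.1]
      rcases hW : dfsAltWhile g node (2 * (c.set node.toNat 1).length + 1)
          (c.set node.toNat 1) (comp.set node.toNat node) [node] with ⟨c2, cp2⟩
      obtain ⟨wlen, wmono⟩ := altWhile_mono g n node hg (2 * (c.set node.toNat 1).length + 1)
        (c.set node.toNat 1) (comp.set node.toNat node) [node]
        (by intro p hp; simp at hp; subst hp; exact ⟨hnode.1, hnode.2⟩)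
      rw [hW] at wlen wmono
      have hsetmono : ∀ u : Int, 0 ≤ u → vAt c u ≠ -1 →
          vAt (c.set node.toNat 1) u = vAt c u := by
        intro u hu0 hcu
        by_cases hin : node.toNat < c.length
        · rw [vAt_set c node u 1 hnode.1 hin hu0]
          by_cases huv : u = node
          · rw [huv] at hcu; exact absurd h1 hcu
          · simp [huv]
        · rw [List.set_eq_of_length_le (by omega)]
      obtain ⟨ilen, imono⟩ := ih (c2, cp2, roots ++ [node]) (fun x hx => hbs x (by simp [hx]))
      refine ⟨by simp only at ilen ⊢; rw [ilen, wlen]; simp, ?_⟩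
      intro u hu0 hcu
      have h2 : vAt c2 u = vAt c u := by
        rw [wmono u hu0 (by rw [hsetmono u hu0 hcu]; exact hcu), hsetmono u hu0 hcu]
      have h3 := imono u hu0 (by simp only [h2]; exact hcu)
      simp only at h3
      rw [h3, h2]
    · rw [if_pos h1]
      exact ih (c, comp, roots) (fun x hx => hbs x (by simp [hx]))

-- one neighbour sweep, synchronized between the two ports (success case)
lemma neigh_sync (g : List (List Int)) (n root cc cur : Int) (ns : List Int) :
    ∀ (c comp st : List Int) (sub : Int × Int) (c' : List Int) (sub' : Int × Int)
      (st' : List Int),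
    GoodG g n → ColOK n c → CompOK n c comp → StackOK n c st →
    (cc = 0 ∨ cc = 1) →
    0 ≤ root → root < n → vAt c root ≠ -1 → vAt comp root = root →
    (∀ v ∈ ns, 0 ≤ v ∧ v < n) →
    0 ≤ cur → cur < n → vAt c cur = cc → cur ∉ st →
    (∀ v ∈ rowOf g cur, v ∈ ns ∨ (vAt c v ≠ -1 ∧ vAt c v ≠ cc)) →
    Proper g n c (cur :: st) →
    sub = (cnt c comp root 0, cnt c comp root 1) →
    dfsNeigh c cc sub st ns = some (c', sub', st') →
    ∃ comp',
      dfsAltNeigh c comp cc root st ns = (c', comp', st') ∧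
      ColOK n c' ∧ CompOK n c' comp' ∧ StackOK n c' st' ∧
      (∀ u : Int, 0 ≤ u → u < n → vAt c u ≠ -1 →
        vAt c' u = vAt c u ∧ vAt comp' u = vAt comp u) ∧
      sub' = (cnt c' comp' root 0, cnt c' comp' root 1) ∧
      (∀ r v : Int, r ≠ root → v ≠ -1 → cnt c' comp' r v = cnt c comp r v) ∧
      2 * pvUnc c' + st'.length ≤ 2 * pvUnc c + st.length ∧
      Proper g n c' st' := by
  induction ns with
  | nil =>
    intro c comp st sub c' sub' st' hg hcol hcomp hstk hcc hr0 hrn hcr hcompr hns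
      hcur0 hcurn hcurc hcurst hpre hprop hsub hA
    simp only [dfsNeigh, Option.some.injEq, Prod.mk.injEq] at hA
    obtain ⟨rfl, rfl, rfl⟩ := hA
    refine ⟨comp, by simp [dfsAltNeigh], hcol, hcomp, hstk,
      fun u _ _ _ => ⟨rfl, rfl⟩, hsub, fun r v _ _ => rfl, le_refl _, ?_⟩
    intro u hu0 hun hcu hust w hw
    by_cases hucur : u = cur
    · subst hucur
      rcases hpre w hw with h | h
      · simp at h
      · rw [hcurc]; exact h
    · exact hprop u hu0 hun hcu (by simp [hust, hucur]) w hw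
  | cons v rest ih =>
    intro c comp st sub c' sub' st' hg hcol hcomp hstk hcc hr0 hrn hcr hcompr hns
      hcur0 hcurn hcurc hcurst hpre hprop hsub hA
    have hv := hns v (by simp)
    simp only [dfsNeigh] at hA
    simp only [dfsAltNeigh]
    rw [pyGetD_vAt c v hv.1] at hA ⊢
    by_cases h1 : vAt c v = -1
    · -- push branch
      rw [if_neg (not_not_intro h1)] at hA
      rw [if_pos h1]
      rw [pySetD_set c v (1 - cc) hv.1] at hA
      rw [pySetD_set c v (1 - cc) hv.1, pySetD_set comp v root hv.1]
      have hin : v.toNat < c.length := by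
        rw [hcol.1]; omega
      have hinp : v.toNat < comp.length := by
        rw [hcomp.1]; omega
      set c2 := c.set v.toNat (1 - cc) with hc2def
      set comp2 := comp.set v.toNat root with hcomp2def
      have hc2 : ∀ w : Int, 0 ≤ w → vAt c2 w = if w = v then 1 - cc else vAt c w :=
        fun w hw => vAt_set c v w (1 - cc) hv.1 hin hw
      have hcomp2 : ∀ w : Int, 0 ≤ w → vAt comp2 w = if w = v then root else vAt comp w :=
        fun w hw => vAt_set comp v w root hv.1 hinp hw
      have hoppne : 1 - cc ≠ -1 := by rcases hcc with h | h <;> omega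
      have hoppcc : 1 - cc ≠ cc := by rcases hcc with h | h <;> omega
      have hrv : root ≠ v := by
        intro h; rw [h] at hcr; exact hcr h1
      have hcurv : cur ≠ v := by
        intro h; rw [h] at hcurc; rw [hcurc] at h1
        rcases hcc with h' | h' <;> omega
      have hlen' : comp.length = c.length := by rw [hcomp.1, hcol.1]
      have hcr2 : vAt c2 root ≠ -1 := by rw [hc2 root hr0]; simp [hrv]; exact hcr
      have hcompr2 : vAt comp2 root = root := by rw [hcomp2 root hr0]; simp [hrv]; exact hcompr
      have hcol2 : ColOK n c2 := by
        refine ⟨by simp [hc2def, hcol.1], ?_⟩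
        intro u hu0 hun
        rw [hc2 u hu0]
        by_cases huv : u = v
        · rcases hcc with h | h <;> simp [huv, h]
        · simp [huv]; exact hcol.2 u hu0 hun
      have hcomp2ok : CompOK n c2 comp2 := by
        refine ⟨by simp [hcomp2def, hcomp.1], ?_⟩
        intro u hu0 hun
        rw [hc2 u hu0, hcomp2 u hu0]
        by_cases huv : u = v
        · rw [if_pos huv, if_pos huv]
          refine ⟨by omega, fun _ => ⟨hr0, hrn, hcr2, hcompr2⟩⟩
        · rw [if_neg huv, if_neg huv]
          refine ⟨(hcomp.2 u hu0 hun).1, ?_⟩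
          intro hne
          obtain ⟨ha, hb, hcc', hdd⟩ := (hcomp.2 u hu0 hun).2 hne
          have hrne : vAt comp u ≠ v := by
            intro h; rw [h] at hcc'; exact hcc' h1
          refine ⟨ha, hb, ?_, ?_⟩
          · rw [hc2 _ ha]; simp [hrne]; exact hcc'
          · rw [hcomp2 _ ha]; simp [hrne]; exact hdd
      have hstk2 : StackOK n c2 (v :: st) := by
        have hvst : v ∉ st := by
          intro h; exact (hstk.2 v h).2.2 h1
        refine ⟨by simp [hstk.1, hvst], ?_⟩
        intro p hp
        rcases List.mem_cons.mp hp with h | h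
        · subst h; refine ⟨hv.1, hv.2, ?_⟩
          rw [hc2 p hv.1]; simp [hoppne]
        · obtain ⟨ha, hb, hcp⟩ := hstk.2 p h
          refine ⟨ha, hb, ?_⟩
          rw [hc2 p ha]
          by_cases hpv : p = v
          · rw [hpv] at hcp; exact absurd h1 hcp
          · simp [hpv]; exact hcp
      have hcurc2 : vAt c2 cur = cc := by rw [hc2 cur hcur0]; simp [hcurv]; exact hcurc
      have hcurst2 : cur ∉ (v :: st) := by simp [hcurv, hcurst]
      have hpre2 : ∀ w ∈ rowOf g cur, w ∈ rest ∨ (vAt c2 w ≠ -1 ∧ vAt c2 w ≠ cc) := by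
        intro w hw
        have hw0 : 0 ≤ w := (hg cur hcur0 hcurn w hw).1
        rcases hpre w hw with h | h
        · rcases List.mem_cons.mp h with h' | h'
          · right; rw [h', hc2 v hv.1]; simp [hoppne, hoppcc]
          · left; exact h'
        · right
          have hwv : w ≠ v := by intro hh; rw [hh] at h; exact h.1 h1
          rw [hc2 w hw0]; simp [hwv]; exact h
      have hprop2 : Proper g n c2 (cur :: v :: st) := by
        intro u hu0 hun hcu hust w hw
        have hw0 : 0 ≤ w := (hg u hu0 hun w hw).1
        have huv : u ≠ v := by simp at hust; intro hh; exact hust.2.1 hh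
        have hcuold : vAt c u ≠ -1 := by
          rw [hc2 u hu0] at hcu; simpa [huv] using hcu
        obtain ⟨ha, hb⟩ := hprop u hu0 hun hcuold (by simp at hust ⊢; exact ⟨hust.1, hust.2.2⟩) w hw
        have hwv : w ≠ v := by intro hh; rw [hh] at ha; exact ha h1
        rw [hc2 w hw0, hc2 u hu0]
        simp [hwv, huv]
        exact ⟨ha, hb⟩
      have hsub2 : (if 1 - cc = 0 then (sub.1 + 1, sub.2) else (sub.1, sub.2 + 1))
          = (cnt c2 comp2 root 0, cnt c2 comp2 root 1) := by
        have hold0 : ¬ (vAt comp v = root ∧ vAt c v = 0) :=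
          fun hh => absurd (h1.symm.trans hh.2) (by norm_num)
        have hold1 : ¬ (vAt comp v = root ∧ vAt c v = 1) :=
          fun hh => absurd (h1.symm.trans hh.2) (by norm_num)
        have e0 := cnt_set c comp hlen' v (1 - cc) root root 0 hv.1 hin hold0
        have e1 := cnt_set c comp hlen' v (1 - cc) root root 1 hv.1 hin hold1
        rw [← hc2def, ← hcomp2def] at e0 e1
        rcases hcc with h | h <;> subst h <;> norm_num at e0 e1 ⊢ <;> rw [hsub] <;>
          constructor <;> omega
      obtain ⟨comp', hBeq, f1, f2, f3, f4, f5, f6, f7, f8⟩ :=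
        ih c2 comp2 (v :: st) _ c' sub' st' hg hcol2 hcomp2ok hstk2 hcc hr0 hrn hcr2 hcompr2
          (fun x hx => hns x (by simp [hx])) hcur0 hcurn hcurc2 hcurst2 hpre2 hprop2 hsub2 hA
      refine ⟨comp', hBeq, f1, f2, f3, ?_, f5, ?_, ?_, f8⟩
      · intro u hu0 hun hcu
        have huv : u ≠ v := by intro hh; rw [hh] at hcu; exact hcu h1
        have h2c : vAt c2 u = vAt c u := by rw [hc2 u hu0]; simp [huv]
        have h2p : vAt comp2 u = vAt comp u := by rw [hcomp2 u hu0]; simp [huv]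
        obtain ⟨m1, m2⟩ := f4 u hu0 hun (by rw [h2c]; exact hcu)
        exact ⟨by rw [m1, h2c], by rw [m2, h2p]⟩
      · intro r w hr hw
        rw [f6 r w hr hw]
        have e := cnt_set c comp hlen' v (1 - cc) root r w hv.1 hin
          (fun hh => hw (hh.2.symm.trans h1))
        rw [e, if_neg (fun hh => hr hh.1.symm)]
        simp
      · have hu2 : pvUnc c2 + 1 = pvUnc c := unc_set c v (1 - cc) hv.1 hin h1 hoppne
        simp only [List.length_cons] at f7 ⊢
        omega
    · -- already-colored branch
      rw [if_pos h1] at hA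
      by_cases h2 : vAt c v = cc
      · rw [if_pos h2] at hA; exact absurd hA (by simp)
      · rw [if_neg h2] at hA
        rw [if_neg h1]
        refine ih c comp st sub c' sub' st' hg hcol hcomp hstk hcc hr0 hrn hcr hcompr
          (fun x hx => hns x (by simp [hx])) hcur0 hcurn hcurc hcurst ?_ hprop hsub hA
        intro w hw
        rcases hpre w hw with h | h
        · rcases List.mem_cons.mp h with h' | h'
          · right; rw [h']; exact ⟨h1, h2⟩
          · left; exact h'
        · right; exact h

-- the component traversal, synchronized between the two ports (success case)
lemma while_sync (g : List (List Int)) (n root : Int) (hg : GoodG g n)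
    (hroot0 : 0 ≤ root) (hrootn : root < n) :
    ∀ (fuel : Nat) (c comp st : List Int) (sub : Int × Int) (c'' : List Int)
      (sub'' : Int × Int),
    ColOK n c → CompOK n c comp → StackOK n c st → Proper g n c st →
    vAt c root ≠ -1 → vAt comp root = root →
    sub = (cnt c comp root 0, cnt c comp root 1) →
    2 * pvUnc c + st.length < fuel →
    dfsWhile g fuel c sub st = some (c'', sub'') →
    ∃ comp'',
      dfsAltWhile g root fuel c comp st = (c'', comp'') ∧
      ColOK n c'' ∧ CompOK n c'' comp'' ∧ Proper g n c'' [] ∧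
      (∀ u : Int, 0 ≤ u → u < n → vAt c u ≠ -1 →
        vAt c'' u = vAt c u ∧ vAt comp'' u = vAt comp u) ∧
      sub'' = (cnt c'' comp'' root 0, cnt c'' comp'' root 1) ∧
      (∀ r v : Int, r ≠ root → v ≠ -1 → cnt c'' comp'' r v = cnt c comp r v) := by
  intro fuel
  induction fuel with
  | zero =>
    intro c comp st sub c'' sub'' _ _ _ _ _ _ _ hfuel _
    omega
  | succ f ih =>
    intro c comp st sub c'' sub'' hcol hcomp hstk hprop hcr hcompr hsub hfuel hA
    cases st with
    | nil =>
      simp only [dfsWhile, Option.some.injEq, Prod.mk.injEq] at hA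
      obtain ⟨rfl, rfl⟩ := hA
      exact ⟨comp, by simp [dfsAltWhile], hcol, hcomp, hprop,
        fun u _ _ _ => ⟨rfl, rfl⟩, hsub, fun r v _ _ => rfl⟩
    | cons cur rest =>
      have hcur := hstk.2 cur (by simp)
      simp only [dfsWhile] at hA
      simp only [dfsAltWhile]
      rw [pyGetD_vAt c cur hcur.1, pyGetD_rowOf g cur hcur.1] at hA ⊢
      have hccval : vAt c cur = 0 ∨ vAt c cur = 1 := by
        rcases hcol.2 cur hcur.1 hcur.2.1 with h | h | h
        · exact absurd h hcur.2.2
        · exact Or.inl h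
        · exact Or.inr h
      rcases hN : dfsNeigh c (vAt c cur) sub rest (rowOf g cur) with _ | ⟨⟨cx, sx, stx⟩⟩
      · rw [hN] at hA; simp at hA
      · rw [hN] at hA
        simp only at hA
        obtain ⟨comp', hBeq, f1, f2, f3, f4, f5, f6, f7, f8⟩ :=
          neigh_sync g n root (vAt c cur) cur (rowOf g cur) c comp rest sub cx sx stx hg hcol
            hcomp ⟨(List.nodup_cons.mp hstk.1).2, fun p hp => hstk.2 p (by simp [hp])⟩
            hccval hroot0 hrootn hcr hcompr
            (fun w hw => ⟨(hg cur hcur.1 hcur.2.1 w hw).1, (hg cur hcur.1 hcur.2.1 w hw).2⟩)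
            hcur.1 hcur.2.1 rfl (List.nodup_cons.mp hstk.1).1
            (fun w hw => Or.inl hw) hprop hsub hN
        rw [hBeq]
        simp only
        obtain ⟨hm1, hm2⟩ := f4 root hroot0 hrootn hcr
        obtain ⟨comp'', g1, g2, g3, g4, g5, g6, g7⟩ :=
          ih cx comp' stx sx c'' sub'' f1 f2 f3 f8 (by rw [hm1]; exact hcr)
            (by rw [hm2]; exact hcompr) f5 (by simp at hfuel ⊢; omega) hA
        refine ⟨comp'', g1, g2, g3, g4, ?_, g6, ?_⟩
        · intro u hu0 hun hcu
          obtain ⟨a1, a2⟩ := f4 u hu0 hun hcu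
          obtain ⟨b1, b2⟩ := g5 u hu0 hun (by rw [a1]; exact hcu)
          exact ⟨by rw [b1, a1], by rw [b2, a2]⟩
        · intro r w hr hw
          rw [g7 r w hr hw, f6 r w hr hw]

-- if A's traversal hits `return 0`, B's finished coloring has an equal-colored edge
lemma while_conflict (g : List (List Int)) (n root : Int) (hg : GoodG g n)
    (hroot0 : 0 ≤ root) (hrootn : root < n) :
    ∀ (fuel : Nat) (c comp st : List Int) (sub : Int × Int),
    ColOK n c → CompOK n c comp → StackOK n c st → Proper g n c st →
    vAt c root ≠ -1 → vAt comp root = root →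
    sub = (cnt c comp root 0, cnt c comp root 1) →
    2 * pvUnc c + st.length < fuel →
    dfsWhile g fuel c sub st = none →
    ∃ u v : Int, 0 ≤ u ∧ u < n ∧ v ∈ rowOf g u ∧ 0 ≤ v ∧
      vAt (dfsAltWhile g root fuel c comp st).1 u ≠ -1 ∧
      vAt (dfsAltWhile g root fuel c comp st).1 v
        = vAt (dfsAltWhile g root fuel c comp st).1 u := by
  intro fuel
  induction fuel with
  | zero =>
    intro c comp st sub _ _ _ _ _ _ _ hfuel _
    omega
  | succ f ih =>
    intro c comp st sub hcol hcomp hstk hprop hcr hcompr hsub hfuel hA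
    cases st with
    | nil => simp [dfsWhile] at hA
    | cons cur rest =>
      have hcur := hstk.2 cur (by simp)
      simp only [dfsWhile] at hA
      simp only [dfsAltWhile]
      rw [pyGetD_vAt c cur hcur.1, pyGetD_rowOf g cur hcur.1] at hA ⊢
      have hccval : vAt c cur = 0 ∨ vAt c cur = 1 := by
        rcases hcol.2 cur hcur.1 hcur.2.1 with h | h | h
        · exact absurd h hcur.2.2
        · exact Or.inl h
        · exact Or.inr h
      have hrow0 : ∀ w ∈ rowOf g cur, 0 ≤ w := fun w hw => (hg cur hcur.1 hcur.2.1 w hw).1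
      rcases hN : dfsNeigh c (vAt c cur) sub rest (rowOf g cur) with _ | ⟨⟨cx, sx, stx⟩⟩
      · -- conflict found at cur's row
        obtain ⟨w, hwmem, hw0, hwc⟩ := neigh_conflict (rowOf g cur) c (vAt c cur) sub rest
          hccval hrow0 hN
        rcases hR : dfsAltNeigh c comp (vAt c cur) root rest (rowOf g cur) with ⟨ce, cpe, ste⟩
        simp only
        obtain ⟨e1, e2, e3⟩ := altNeigh_mono (rowOf g cur) c comp (vAt c cur) root rest hrow0
        rw [hR] at e1 e2 e3
        simp only at e1 e2 e3
        have hstb : ∀ p ∈ ste, 0 ≤ p ∧ p < n := by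
          intro p hp
          rcases e3 p hp with h | h
          · exact ⟨(hstk.2 p (by simp [h])).1, (hstk.2 p (by simp [h])).2.1⟩
          · exact hg cur hcur.1 hcur.2.1 p h
        obtain ⟨w1, w2⟩ := altWhile_mono g n root hg f ce cpe ste hstb
        refine ⟨cur, w, hcur.1, hcur.2.1, hwmem, hw0, ?_, ?_⟩
        · rw [w2 cur hcur.1 (by rw [e2 cur hcur.1 hcur.2.2]; exact hcur.2.2),
            e2 cur hcur.1 hcur.2.2]
          exact hcur.2.2
        · have hwne : vAt c w ≠ -1 := by
            rw [hwc]; rcases hccval with h | h <;> simp [h]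
          rw [w2 cur hcur.1 (by rw [e2 cur hcur.1 hcur.2.2]; exact hcur.2.2),
            e2 cur hcur.1 hcur.2.2,
            w2 w hw0 (by rw [e2 w hw0 hwne]; exact hwne), e2 w hw0 hwne, hwc]
      · rw [hN] at hA
        simp only at hA
        obtain ⟨comp', hBeq, f1, f2, f3, f4, f5, f6, f7, f8⟩ :=
          neigh_sync g n root (vAt c cur) cur (rowOf g cur) c comp rest sub cx sx stx hg hcol
            hcomp ⟨(List.nodup_cons.mp hstk.1).2, fun p hp => hstk.2 p (by simp [hp])⟩
            hccval hroot0 hrootn hcr hcompr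
            (fun w hw => ⟨(hg cur hcur.1 hcur.2.1 w hw).1, (hg cur hcur.1 hcur.2.1 w hw).2⟩)
            hcur.1 hcur.2.1 rfl (List.nodup_cons.mp hstk.1).1
            (fun w hw => Or.inl hw) hprop hsub hN
        rw [hBeq]
        simp only
        obtain ⟨hm1, hm2⟩ := f4 root hroot0 hrootn hcr
        exact ih cx comp' stx sx f1 f2 f3 f8 (by rw [hm1]; exact hcr)
          (by rw [hm2]; exact hcompr) f5 (by simp at hfuel ⊢; omega) hA

-- an equal-colored edge makes B's validation fire
lemma bad_true (g : List (List Int)) (n : Int) (c : List Int) (u v : Int)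
    (hu0 : 0 ≤ u) (hun : u < n) (hv : v ∈ rowOf g u) (hv0 : 0 ≤ v)
    (heq : vAt c v = vAt c u) : dfsAltBad g c n = true := by
  unfold dfsAltBad
  rw [List.any_eq_true]
  refine ⟨u, ?_, ?_⟩
  · rw [PySem.List.mem_pyRange_one]; exact ⟨hu0, hun⟩
  · rw [List.any_eq_true]
    refine ⟨v, ?_, ?_⟩
    · rw [pyGetD_rowOf g u hu0]; exact hv
    · rw [pyGetD_vAt c v hv0, pyGetD_vAt c u hu0, heq]; simp

-- a fully colored, conflict-free coloring passes B's validation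
lemma bad_false (g : List (List Int)) (n : Int) (c : List Int) (hg : GoodG g n)
    (hall : ∀ u : Int, 0 ≤ u → u < n → vAt c u ≠ -1) (hp : Proper g n c []) :
    dfsAltBad g c n = false := by
  unfold dfsAltBad
  rw [List.any_eq_false]
  intro u hu
  rw [PySem.List.mem_pyRange_one] at hu
  simp only [Bool.not_eq_true]
  rw [List.any_eq_false]
  intro v hv
  rw [pyGetD_rowOf g u hu.1] at hv
  have hv0 : 0 ≤ v := (hg u hu.1 hu.2 v hv).1
  obtain ⟨_, hne⟩ := hp u hu.1 hu.2 (hall u hu.1 hu.2) (by simp) v hv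
  rw [pyGetD_vAt c v hv0, pyGetD_vAt c u hu.1]
  simp only [Bool.not_eq_true]
  simp [hne]

-- B's counting dict computes cnt for every key
lemma counts_getD (c comp : List Int) (n : Int) (hlen : c.length = n.toNat)
    (hcol : ∀ u : Int, 0 ≤ u → u < n → vAt c u = 0 ∨ vAt c u = 1) :
    ∀ r : Int, (dfsAltCounts c comp n).getD r (0, 0) = (cnt c comp r 0, cnt c comp r 1) := by
  have key : ∀ (vs : List Int) (d : PySem.Dict Int (Int × Int)) (r : Int),
      ((vs.foldl (fun d v =>
          let key := PySem.List.pyGetD comp v 0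
          let cc := d.getD key (0, 0)
          if PySem.List.pyGetD c v 0 = 0 then d.insert key (cc.1 + 1, cc.2)
          else d.insert key (cc.1, cc.2 + 1)) d).getD r (0, 0))
        = ((d.getD r (0, 0)).1
             + ((vs.countP (fun v => PySem.List.pyGetD comp v 0 == r
                  && (PySem.List.pyGetD c v 0 == 0)) : Nat) : Int),
           (d.getD r (0, 0)).2
             + ((vs.countP (fun v => PySem.List.pyGetD comp v 0 == r
                  && !(PySem.List.pyGetD c v 0 == 0)) : Nat) : Int)) := by
    intro vs
    induction vs with
    | nil => intro d r; simp
    | cons v rest ihv =>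
      intro d r
      simp only [List.foldl_cons, List.countP_cons]
      by_cases hcv : PySem.List.pyGetD c v 0 = 0
      · rw [if_pos hcv]
        rw [ihv]
        rw [PySem.Dict.getD_insert]
        by_cases hk : r = PySem.List.pyGetD comp v 0
        · rw [if_pos hk]
          simp [hk, hcv, Prod.ext_iff]
          omega
        · rw [if_neg hk]
          have : (PySem.List.pyGetD comp v 0 == r) = false := by
            simp; exact fun hh => hk hh.symm
          simp [this, hcv]
      · rw [if_neg hcv]
        rw [ihv]
        rw [PySem.Dict.getD_insert]
        by_cases hk : r = PySem.List.pyGetD comp v 0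
        · rw [if_pos hk]
          simp [hk, hcv, Prod.ext_iff]
          omega
        · rw [if_neg hk]
          have : (PySem.List.pyGetD comp v 0 == r) = false := by
            simp; exact fun hh => hk hh.symm
          simp [this, hcv]
  intro r
  unfold dfsAltCounts
  rw [key]
  rw [PySem.Dict.getD_empty]
  simp only
  have hrange : PySem.List.pyRange 0 n 1 = (List.range n.toNat).map (fun k : Nat => (k : Int)) := by
    rw [PySem.List.pyRange_one]
    simp
  rw [hrange, List.countP_map, List.countP_map]
  have h0 : ∀ i ∈ List.range c.length,
      ((fun v => PySem.List.pyGetD comp v 0 == r && (PySem.List.pyGetD c v 0 == 0)) ∘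
        (fun k : Nat => (k : Int))) i = (fun i : Nat => vAt comp (i : Int) == r && vAt c (i : Int) == 0) i := by
    intro i _
    simp only [Function.comp_apply]
    rw [pyGetD_vAt comp (i : Int) (by positivity), pyGetD_vAt c (i : Int) (by positivity)]
  have h1 : ∀ i ∈ List.range c.length,
      ((fun v => PySem.List.pyGetD comp v 0 == r && !(PySem.List.pyGetD c v 0 == 0)) ∘
        (fun k : Nat => (k : Int))) i = (fun i : Nat => vAt comp (i : Int) == r && vAt c (i : Int) == 1) i := by
    intro i hi
    simp only [Function.comp_apply]
    rw [pyGetD_vAt comp (i : Int) (by positivity), pyGetD_vAt c (i : Int) (by positivity)]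
    have hiN : i < c.length := by simpa using hi
    have : vAt c (i : Int) = 0 ∨ vAt c (i : Int) = 1 := by
      apply hcol <;> omega
    rcases this with h | h <;> simp [h]
  rw [show n.toNat = c.length from hlen.symm]
  have e0 : (List.range c.length).countP
        ((fun v => PySem.List.pyGetD comp v 0 == r && (PySem.List.pyGetD c v 0 == 0)) ∘
          (fun k : Nat => (k : Int)))
      = (List.range c.length).countP
        (fun i : Nat => vAt comp (i : Int) == r && vAt c (i : Int) == 0) :=
    List.countP_congr (fun i hi => by rw [h0 i hi])
  have e1 : (List.range c.length).countP
        ((fun v => PySem.List.pyGetD comp v 0 == r && !(PySem.List.pyGetD c v 0 == 0)) ∘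
          (fun k : Nat => (k : Int)))
      = (List.range c.length).countP
        (fun i : Nat => vAt comp (i : Int) == r && vAt c (i : Int) == 1) :=
    List.countP_congr (fun i hi => by rw [h1 i hi])
  rw [e0, e1]
  unfold cnt
  simp

-- B's product fold equals ansOf
lemma prod_eq (counts : PySem.Dict Int (Int × Int)) (c comp roots : List Int)
    (h : ∀ r : Int, counts.getD r (0, 0) = (cnt c comp r 0, cnt c comp r 1)) :
    dfsAltProd counts roots = ansOf c comp roots := by
  unfold dfsAltProd ansOf
  suffices h' : ∀ (l : List Int) (a : Int),
      l.foldl (fun ans r =>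
        let cc := counts.getD r (0, 0)
        ans * (pvPow2 cc.1 pvMOD + pvPow2 cc.2 pvMOD) % pvMOD) a
      = l.foldl (fun ans r =>
        ans * (pvPow2 (cnt c comp r 0) pvMOD + pvPow2 (cnt c comp r 1) pvMOD) % pvMOD) a by
    exact h' roots 1
  intro l
  induction l with
  | nil => intro a; rfl
  | cons r rest ihl =>
    intro a
    simp only [List.foldl_cons]
    rw [h r]
    exact ihl _

-- ansOf only looks at the counts of its roots
lemma ansOf_congr (c comp c' comp' roots : List Int)
    (h : ∀ r ∈ roots, cnt c' comp' r 0 = cnt c comp r 0 ∧ cnt c' comp' r 1 = cnt c comp r 1) :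
    ansOf c' comp' roots = ansOf c comp roots := by
  unfold ansOf
  suffices h' : ∀ (l : List Int) (a : Int),
      (∀ r ∈ l, cnt c' comp' r 0 = cnt c comp r 0 ∧ cnt c' comp' r 1 = cnt c comp r 1) →
      l.foldl (fun a r =>
        a * (pvPow2 (cnt c' comp' r 0) pvMOD + pvPow2 (cnt c' comp' r 1) pvMOD) % pvMOD) a
      = l.foldl (fun a r =>
        a * (pvPow2 (cnt c comp r 0) pvMOD + pvPow2 (cnt c comp r 1) pvMOD) % pvMOD) a by
    exact h' roots 1 h
  intro l
  induction l with
  | nil => intro a _; rfl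
  | cons r rest ihl =>
    intro a hl
    simp only [List.foldl_cons]
    rw [(hl r (by simp)).1, (hl r (by simp)).2]
    exact ihl _ (fun x hx => hl x (by simp [hx]))

-- the outer loops, synchronized: A's interleaved answer equals B's pipeline
lemma outer_sync (g : List (List Int)) (n : Int) (hg : GoodG g n) :
    ∀ (ns : List Int) (c comp roots : List Int) (ans : Int),
    ColOK n c → CompOK n c comp → Proper g n c [] →
    (∀ x ∈ ns, 0 ≤ x ∧ x < n) →
    (∀ u : Int, 0 ≤ u → u < n → u ∉ ns → vAt c u ≠ -1) →
    (∀ r ∈ roots, 0 ≤ r ∧ r < n ∧ vAt c r ≠ -1 ∧ vAt comp r = r) →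
    ans = ansOf c comp roots →
    dfsOuter g ns c ans = pvFinish g n (dfsAltColor g ns (c, comp, roots)) := by
  intro ns
  induction ns with
  | nil =>
    intro c comp roots ans hcol hcomp hprop hb hcov hroots hans
    simp only [dfsOuter, dfsAltColor, pvFinish]
    have hallc : ∀ u : Int, 0 ≤ u → u < n → vAt c u ≠ -1 :=
      fun u a b => hcov u a b (by simp)
    rw [bad_false g n c hg hallc hprop]
    have hcolv : ∀ u : Int, 0 ≤ u → u < n → vAt c u = 0 ∨ vAt c u = 1 := by
      intro u a b
      rcases hcol.2 u a b with h | h | h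
      · exact absurd h (hallc u a b)
      · exact Or.inl h
      · exact Or.inr h
    rw [if_neg (by simp)]
    rw [prod_eq (dfsAltCounts c comp n) c comp roots (counts_getD c comp n hcol.1 hcolv)]
    exact hans
  | cons node rest ih =>
    intro c comp roots ans hcol hcomp hprop hb hcov hroots hans
    have hnode := hb node (by simp)
    simp only [dfsOuter, dfsAltColor]
    rw [pyGetD_vAt c node hnode.1]
    by_cases h1 : vAt c node = -1
    · rw [if_neg (not_not_intro h1), if_neg (not_not_intro h1)]
      rw [pySetD_set c node 1 hnode.1, pySetD_set comp node node hnode.1]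
      have hin : node.toNat < c.length := by rw [hcol.1]; omega
      have hinp : node.toNat < comp.length := by rw [hcomp.1]; omega
      have hlen' : comp.length = c.length := by rw [hcomp.1, hcol.1]
      set c1 := c.set node.toNat 1 with hc1def
      set comp1 := comp.set node.toNat node with hcomp1def
      have hc1 : ∀ w : Int, 0 ≤ w → vAt c1 w = if w = node then 1 else vAt c w :=
        fun w hw => vAt_set c node w 1 hnode.1 hin hw
      have hcomp1 : ∀ w : Int, 0 ≤ w → vAt comp1 w = if w = node then node else vAt comp w :=
        fun w hw => vAt_set comp node w node hnode.1 hinp hw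
      have hcr1 : vAt c1 node ≠ -1 := by rw [hc1 node hnode.1]; simp
      have hcompr1 : vAt comp1 node = node := by rw [hcomp1 node hnode.1]; simp
      have hcol1 : ColOK n c1 := by
        refine ⟨by simp [hc1def, hcol.1], ?_⟩
        intro u hu0 hun
        rw [hc1 u hu0]
        by_cases huv : u = node
        · simp [huv]
        · simp [huv]; exact hcol.2 u hu0 hun
      have hcomp1ok : CompOK n c1 comp1 := by
        refine ⟨by simp [hcomp1def, hcomp.1], ?_⟩
        intro u hu0 hun
        rw [hc1 u hu0, hcomp1 u hu0]
        by_cases huv : u = node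
        · rw [if_pos huv, if_pos huv]
          refine ⟨by constructor <;> intro hh <;> omega,
            fun _ => ⟨hnode.1, hnode.2, hcr1, hcompr1⟩⟩
        · rw [if_neg huv, if_neg huv]
          refine ⟨(hcomp.2 u hu0 hun).1, ?_⟩
          intro hne
          obtain ⟨ha, hb2, hcc', hdd⟩ := (hcomp.2 u hu0 hun).2 hne
          have hrne : vAt comp u ≠ node := by
            intro h; rw [h] at hcc'; exact hcc' h1
          refine ⟨ha, hb2, ?_, ?_⟩
          · rw [hc1 _ ha]; simp [hrne]; exact hcc'
          · rw [hcomp1 _ ha]; simp [hrne]; exact hdd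
      have hstk1 : StackOK n c1 [node] := by
        refine ⟨by simp, ?_⟩
        intro p hp
        simp at hp
        subst hp
        exact ⟨hnode.1, hnode.2, hcr1⟩
      have hprop1 : Proper g n c1 [node] := by
        intro u hu0 hun hcu hust w hw
        simp at hust
        have hcuold : vAt c u ≠ -1 := by
          rw [hc1 u hu0] at hcu; simpa [hust] using hcu
        obtain ⟨ha, hb2⟩ := hprop u hu0 hun hcuold (by simp) w hw
        have hw0 : 0 ≤ w := (hg u hu0 hun w hw).1
        have hwv : w ≠ node := by intro hh; rw [hh] at ha; exact ha h1
        rw [hc1 w hw0, hc1 u hu0]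
        simp [hwv, hust]
        exact ⟨ha, hb2⟩
      have hcnt0 : ∀ w : Int, w ≠ -1 → cnt c comp node w = 0 := by
        intro w hw
        have hz : (List.range c.length).countP
            (fun i : Nat => vAt comp (i : Int) == node && vAt c (i : Int) == w) = 0 := by
          rw [List.countP_eq_zero]
          intro i hi
          simp only [Bool.and_eq_true, beq_iff_eq, not_and]
          intro hcompi
          have hiln : (i : Int) < n := by
            have : i < c.length := by simpa using hi
            rw [hcol.1] at this
            omega
          have h2 := (hcomp.2 (i : Int) (by positivity) hiln).2
            (by rw [hcompi]; omega)
          rw [hcompi] at h2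
          exact absurd h1 h2.2.2.1
        simp [cnt, hz]
      have hsub1 : ((0 : Int), (1 : Int)) = (cnt c1 comp1 node 0, cnt c1 comp1 node 1) := by
        have hold0 : ¬ (vAt comp node = node ∧ vAt c node = 0) :=
          fun hh => absurd (h1.symm.trans hh.2) (by norm_num)
        have hold1 : ¬ (vAt comp node = node ∧ vAt c node = 1) :=
          fun hh => absurd (h1.symm.trans hh.2) (by norm_num)
        have e0 := cnt_set c comp hlen' node 1 node node 0 hnode.1 hin hold0
        have e1 := cnt_set c comp hlen' node 1 node node 1 hnode.1 hin hold1
        rw [← hc1def, ← hcomp1def] at e0 e1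
        rw [hcnt0 0 (by norm_num)] at e0
        rw [hcnt0 1 (by norm_num)] at e1
        norm_num at e0 e1
        rw [e0, e1]
      have hfuel : 2 * pvUnc c1 + [node].length < 2 * c1.length + 1 := by
        have hle := List.countP_le_length (p := fun x : Int => x == -1) (l := c1)
        have hne : pvUnc c1 ≠ c1.length := by
          intro hh
          have hmem : c1[node.toNat]'(by simp [hc1def]; exact hin) ∈ c1 := List.getElem_mem _
          have := List.countP_eq_length.mp hh _ hmem
          have hval : vAt c1 node = c1[node.toNat]'(by simp [hc1def]; exact hin) := by
            simp only [vAt, List.getD]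
            rw [List.getElem?_eq_getElem (by simp [hc1def]; exact hin)]
            rfl
          rw [hc1 node hnode.1] at hval
          simp at hval this
          omega
        simp only [List.length_cons, List.length_nil]
        unfold pvUnc at hne hle ⊢
        omega
      rcases hW : dfsWhile g (2 * c1.length + 1) c1 (0, 1) [node] with _ | ⟨⟨c2, s2⟩⟩
      · -- A hits a conflict and returns 0
        obtain ⟨u, w, hu0, hun, hwmem, hw0, hune, heqw⟩ :=
          while_conflict g n node hg hnode.1 hnode.2 (2 * c1.length + 1) c1 comp1 [node]
            (0, 1) hcol1 hcomp1ok hstk1 hprop1 hcr1 hcompr1 hsub1 hfuel hW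
        rcases hW2 : dfsAltWhile g node (2 * c1.length + 1) c1 comp1 [node] with ⟨c2', cp2'⟩
        rw [hW2] at hune heqw
        simp only at hune heqw
        obtain ⟨-, cmono⟩ := altColor_mono g n hg rest (c2', cp2', roots ++ [node])
          (fun x hx => hb x (by simp [hx]))
        rcases hF : dfsAltColor g rest (c2', cp2', roots ++ [node]) with ⟨cf, cpf, rf⟩
        rw [hF] at cmono
        simp only at cmono
        have hwc2 : vAt c2' w ≠ -1 := by rw [heqw]; exact hune
        have hfu : vAt cf u = vAt c2' u := cmono u hu0 hune
        have hfw : vAt cf w = vAt c2' w := cmono w hw0 hwc2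
        simp only [pvFinish]
        rw [bad_true g n cf u w hu0 hun hwmem hw0 (by rw [hfu, hfw, heqw])]
        simp
      · -- no conflict in this component
        obtain ⟨comp2', hWB, k1, k2, k3, k4, k5, k6⟩ :=
          while_sync g n node hg hnode.1 hnode.2 (2 * c1.length + 1) c1 comp1 [node]
            (0, 1) c2 s2 hcol1 hcomp1ok hstk1 hprop1 hcr1 hcompr1 hsub1 hfuel hW
        rw [hWB]
        simp only
        have hrnode : ∀ r ∈ roots, r ≠ node := by
          intro r hr hh
          have := (hroots r hr).2.2.1
          rw [hh] at this
          exact this h1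
        have hmono2 : ∀ u : Int, 0 ≤ u → u < n → vAt c u ≠ -1 →
            vAt c2 u = vAt c u ∧ vAt comp2' u = vAt comp u := by
          intro u hu0 hun hcu
          have huv : u ≠ node := by intro hh; rw [hh] at hcu; exact hcu h1
          have e1 : vAt c1 u = vAt c u := by rw [hc1 u hu0]; simp [huv]
          have e2 : vAt comp1 u = vAt comp u := by rw [hcomp1 u hu0]; simp [huv]
          obtain ⟨m1, m2⟩ := k4 u hu0 hun (by rw [e1]; exact hcu)
          exact ⟨by rw [m1, e1], by rw [m2, e2]⟩
        have hcong : ∀ r ∈ roots,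
            cnt c2 comp2' r 0 = cnt c comp r 0 ∧ cnt c2 comp2' r 1 = cnt c comp r 1 := by
          intro r hr
          have hrn' : r ≠ node := hrnode r hr
          have step : ∀ w : Int, w ≠ -1 → cnt c1 comp1 r w = cnt c comp r w := by
            intro w hw
            have e := cnt_set c comp hlen' node 1 node r w hnode.1 hin
              (fun hh => hw (hh.2.symm.trans h1))
            rw [← hc1def, ← hcomp1def] at e
            rw [e, if_neg (fun hh => hrn' hh.1.symm)]
            simp
          exact ⟨by rw [k6 r 0 hrn' (by norm_num), step 0 (by norm_num)],
            by rw [k6 r 1 hrn' (by norm_num), step 1 (by norm_num)]⟩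
        apply ih c2 comp2' (roots ++ [node])
          (ans * (pvPow2 s2.1 pvMOD + pvPow2 s2.2 pvMOD) % pvMOD)
          k1 k2 k3 (fun x hx => hb x (by simp [hx]))
        · -- coverage
          intro u hu0 hun hnotin
          by_cases huv : u = node
          · subst huv
            rw [(k4 u hu0 hun hcr1).1]
            exact hcr1
          · have : vAt c u ≠ -1 := hcov u hu0 hun (by simp [hnotin, huv])
            rw [(hmono2 u hu0 hun this).1]
            exact this
        · -- roots
          intro r hr
          rcases List.mem_append.mp hr with h | h
          · obtain ⟨a1, a2, a3, a4⟩ := hroots r h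
            obtain ⟨m1, m2⟩ := hmono2 r a1 a2 a3
            exact ⟨a1, a2, by rw [m1]; exact a3, by rw [m2]; exact a4⟩
          · simp at h
            subst h
            obtain ⟨m1, m2⟩ := k4 r hnode.1 hnode.2 hcr1
            exact ⟨hnode.1, hnode.2, by rw [m1]; exact hcr1, by rw [m2]; exact hcompr1⟩
        · -- answer
          rw [hans]
          have happ : ansOf c2 comp2' (roots ++ [node])
              = (ansOf c2 comp2' roots)
                * (pvPow2 (cnt c2 comp2' node 0) pvMOD + pvPow2 (cnt c2 comp2' node 1) pvMOD)
                % pvMOD := by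
            unfold ansOf
            rw [List.foldl_append]
            simp
          rw [happ, ansOf_congr c comp c2 comp2' roots hcong]
          rw [k5]
    · rw [if_pos h1, if_pos h1]
      apply ih c comp roots ans hcol hcomp hprop (fun x hx => hb x (by simp [hx]))
      · intro u hu0 hun hnotin
        by_cases huv : u = node
        · subst huv; exact h1
        · exact hcov u hu0 hun (by simp [hnotin, huv])
      · exact hroots
      · exact hans

-- ===== VERDICT (by name: the statement is the Claim_ definition above) =====
theorem dfs_spec : Claim_equal_dfs := by
  intro g n _ hpre
  unfold Spec_dfs
  show dfs g n = dfs_alt g n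
  have hg : GoodG g n := by
    intro u hu0 hun v hv
    have hlen : n.toNat ≤ g.length := by
      have := hpre.1
      omega
    have hu'' : u.toNat < g.length := by omega
    have hrow : rowOf g u = g[u.toNat]'hu'' := by
      simp only [rowOf, List.getD]
      rw [List.getElem?_eq_getElem hu'']
      rfl
    have hmem : g[u.toNat]'hu'' ∈ g.take n.toNat := by
      have he : (g.take n.toNat)[u.toNat]'(by simp; omega) = g[u.toNat]'hu'' :=
        List.getElem_take
      rw [← he]
      exact List.getElem_mem _
    exact hpre.2 _ hmem v (by rw [← hrow]; exact hv)
  have hrep : ∀ u : Int, 0 ≤ u → u < n → vAt (List.replicate n.toNat (-1)) u = -1 := by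
    intro u a b
    have : u.toNat < n.toNat := by omega
    simp [vAt, List.getD, this]
  have hcol0 : ColOK n (List.replicate n.toNat (-1)) :=
    ⟨by simp, fun u a b => Or.inl (hrep u a b)⟩
  have hcomp0 : CompOK n (List.replicate n.toNat (-1)) (List.replicate n.toNat (-1)) :=
    ⟨by simp, fun u a b =>
      ⟨⟨fun _ => hrep u a b, fun _ => hrep u a b⟩, fun hne => absurd (hrep u a b) hne⟩⟩
  have hprop0 : Proper g n (List.replicate n.toNat (-1)) [] :=
    fun u a b hcu _ => absurd (hrep u a b) hcu
  have heq := outer_sync g n hg (PySem.List.pyRange 0 n 1) (List.replicate n.toNat (-1))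
    (List.replicate n.toNat (-1)) [] 1 hcol0 hcomp0 hprop0
    (fun x hx => PySem.List.mem_pyRange_one.mp hx)
    (fun u a b hnot => absurd (PySem.List.mem_pyRange_one.mpr ⟨a, b⟩) hnot)
    (fun r hr => absurd hr (by simp))
    rfl
  unfold dfs dfs_alt
  rw [heq]
  rcases hF : dfsAltColor g (PySem.List.pyRange 0 n 1)
      (List.replicate n.toNat (-1), List.replicate n.toNat (-1), []) with ⟨cf, cpf, rf⟩
  simp only [pvFinish]
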